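-- pv_equiv track=rewrite | github.com/maxcharrier/nsi | terminale/recursivite/exercices/ex5.py | sissa2
-- ===== SOURCE A (Python) =====
-- def sissa2(n: int) -> int:
--     assert type(n) == int, "n doit être un entier naturel"
--     assert n >= 0, "n doit être un entier naturel"
--     assert n < 64, "n doit être inférieur à 64"
--
--     if n == 0: # Cas de base
--         return 1, 1 # U(0), S(0)
--     else: # Cas général
--         un = 2 * sissa2(n-1)[0]
--         sn = 2**n + sissa2(n-1)[1]
--         return un, sn # 2 * U(n-1), 2^n + S(n-1)
-- ===== SOURCE B (Python) =====
-- def sissa2(n: int) -> int: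
--     assert type(n) == int, "n doit être un entier naturel"
--     assert n >= 0, "n doit être un entier naturel"
--     assert n < 64, "n doit être inférieur à 64"
--     p = 2 ** n
--     return p, 2 * p - 1
-- ===== Notes on version B (the rewrite author's own statement) =====
-- stated objective: faster
-- what changed: Replaced the exponential double-recursive computation with the closed form (2^n, 2^(n+1)-1) computed from one exponentiation.
import Mathlib
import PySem

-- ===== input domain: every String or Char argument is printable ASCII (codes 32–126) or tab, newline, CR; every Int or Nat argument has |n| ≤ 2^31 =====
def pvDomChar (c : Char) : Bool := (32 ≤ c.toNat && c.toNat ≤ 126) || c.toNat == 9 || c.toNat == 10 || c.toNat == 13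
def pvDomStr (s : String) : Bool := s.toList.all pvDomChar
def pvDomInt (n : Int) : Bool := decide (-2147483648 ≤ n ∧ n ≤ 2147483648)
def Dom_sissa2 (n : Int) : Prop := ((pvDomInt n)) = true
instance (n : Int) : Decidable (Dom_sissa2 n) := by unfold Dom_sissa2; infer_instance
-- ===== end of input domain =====

-- B replaces A's exponential double recursion with the closed form (2^n, 2^(n+1)-1); asymptotically faster.

-- ===== PORT A =====
-- A's recursion on n (Pre_ guarantees 0 ≤ n < 64); transcribed as structural recursion on n.toNat,
-- making both recursive calls exactly as A does.
def sissa2Go : Nat → Int × Int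
  | 0 => (1, 1)
  | Nat.succ k =>
    let un : Int := 2 * (sissa2Go k).1
    let sn : Int := 2 ^ (k + 1) + (sissa2Go k).2
    (un, sn)

def sissa2 (n : Int) : Int × Int := sissa2Go n.toNat

-- ===== PORT B =====
def sissa2_alt (n : Int) : Int × Int :=
  let p : Int := 2 ^ n.toNat
  (p, 2 * p - 1)

-- ===== PRECONDITION & SPEC =====
-- A asserts 0 <= n < 64 and raises AssertionError otherwise; Pre_ excludes exactly those inputs.
def Pre_sissa2 (n : Int) : Prop := 0 ≤ n ∧ n < 64
instance (n : Int) : Decidable (Pre_sissa2 n) := by unfold Pre_sissa2; infer_instance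
def pvWitness_sissa2 : Int := 5

def Spec_sissa2 (n : Int) (out : Int × Int) : Prop := out = sissa2_alt n
instance (n : Int) (out : Int × Int) : Decidable (Spec_sissa2 n out) := by unfold Spec_sissa2; infer_instance

-- ===== CLAIM =====
def Claim_equal_sissa2 : Prop := ∀ (n : Int), Dom_sissa2 n → Pre_sissa2 n → Spec_sissa2 n (sissa2 n)

-- ===== LEMMAS AND PROOFS =====
theorem sissa2Go_closed (k : Nat) : sissa2Go k = ((2 : Int) ^ k, 2 * 2 ^ k - 1) := by
  induction k with
  | zero => simp [sissa2Go]
  | succ m ih =>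
    simp only [sissa2Go, ih]
    refine Prod.ext ?_ ?_ <;> simp <;> ring

-- ===== VERDICT =====
theorem sissa2_spec : Claim_equal_sissa2 := by
  intro n _ _
  unfold Spec_sissa2 sissa2 sissa2_alt
  rw [sissa2Go_closed]
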